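-- pv_equiv track=rewrite | github.com/HNovais/PL | src/yacc.py | split_dot
-- ===== SOURCE A (Python) =====
-- def split_dot(key):
--     quotes = False
--     value = ['']
--     index = 0
--
--     for char in key:
--         if char == '"':
--             quotes = not quotes
--         elif char == '.' and not quotes:
--             value.append('')
--             index += 1
--         else:
--             value[index] += char
--
--     return value
-- ===== SOURCE B (Python) =====
-- def split_dot(key):
--     parts = key.split('"')
--     result = ['']
--     for i, part in enumerate(parts):
--         if i % 2 == 1:
--             result[-1] += part
--         else:
--             pieces = part.split('.')
--             result[-1] += pieces[0]
--             result.extend(pieces[1:])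
--     return result
-- ===== Notes on version B (the rewrite author's own statement) =====
-- stated objective: faster
-- what changed: B replaces A's per-character scan with a quotes flag, segment index and per-character string concatenation by splitting the input on the quote character into alternating unquoted/quoted regions and splitting only the even (unquoted) regions on the dot, merging each region's first piece onto the last segment.
import Mathlib
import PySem

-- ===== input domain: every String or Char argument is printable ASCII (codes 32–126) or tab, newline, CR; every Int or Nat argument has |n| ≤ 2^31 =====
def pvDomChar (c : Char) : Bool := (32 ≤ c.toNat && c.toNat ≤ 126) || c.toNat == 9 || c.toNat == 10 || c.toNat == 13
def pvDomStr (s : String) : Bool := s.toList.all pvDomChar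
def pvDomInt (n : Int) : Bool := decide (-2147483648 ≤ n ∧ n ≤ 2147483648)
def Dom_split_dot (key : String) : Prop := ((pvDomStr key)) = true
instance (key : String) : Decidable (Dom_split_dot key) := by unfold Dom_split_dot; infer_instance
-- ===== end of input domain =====

-- B replaces A's per-character quote-flag scan (quadratic per-character += on the current
-- segment) by splitting on the quote character into alternating unquoted/quoted regions and
-- splitting only the unquoted ones on the dot; objective: faster (measured).

-- ===== PORT A =====
-- the loop body of A (state: quotes flag, segments as char lists, index of the current segment)
def pvStepA (st : Bool × List (List Char) × Nat) (c : Char) : Bool × List (List Char) × Nat :=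
  if c == '"' then (!st.1, st.2.1, st.2.2)
  else if c == '.' && !st.1 then (st.1, st.2.1 ++ [[]], st.2.2 + 1)
  else (st.1, (st.2.1).modify st.2.2 (fun s => s ++ [c]), st.2.2)

def split_dot (key : String) : List String :=
  let st := key.toList.foldl pvStepA (false, [[]], 0)
  st.2.1.map String.ofList

-- ===== PORT B =====
-- result[-1] += s  (on segments kept as char lists)
def pvAddLast (res : List (List Char)) (s : List Char) : List (List Char) :=
  res.dropLast ++ [res.getLastD [] ++ s]

-- the loop body of B
def pvStepB (res : List (List Char)) (ip : Int × List Char) : List (List Char) :=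
  if PySem.Int.mod ip.1 2 == 1 then pvAddLast res ip.2
  else
    let pieces := ip.2.splitOn '.'
    pvAddLast res (pieces.headD []) ++ pieces.tail

def split_dot_alt (key : String) : List String :=
  let parts := key.toList.splitOn '"'
  let result := (PySem.List.enumerate parts).foldl pvStepB [[]]
  result.map String.ofList

-- ===== PRECONDITION & SPEC =====
def Spec_split_dot (key : String) (out : List String) : Prop := out = split_dot_alt key
instance (key : String) (out : List String) : Decidable (Spec_split_dot key out) := by unfold Spec_split_dot; infer_instance

-- ===== CLAIM (what is proved, stated in full; the proofs are below) =====
def Claim_equal_split_dot : Prop := ∀ (key : String), Dom_split_dot key → Spec_split_dot key (split_dot key)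

-- ===== LEMMAS AND PROOFS =====

-- reference recursion: pvG q cs = the segment list A produces from chars cs starting with quote-flag q
def pvG (q : Bool) : List Char → List (List Char)
  | [] => [[]]
  | c :: cs =>
    if c == '"' then pvG (!q) cs
    else if c == '.' && !q then [] :: pvG false cs
    else (pvG q cs).modifyHead (fun s => c :: s)

lemma pvG_ne_nil (q : Bool) (cs : List Char) : pvG q cs ≠ [] := by
  induction cs generalizing q with
  | nil => simp [pvG]
  | cons c cs ih =>
    simp only [pvG]
    split_ifs with h1 h2
    · exact ih (!q)
    · simp
    · cases h : pvG q cs with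
      | nil => exact absurd h (ih q)
      | cons a t => simp [List.modifyHead]

-- merge: glue the head of ys onto the last segment of xs
def pvMergeHead (s : List Char) : List (List Char) → List (List Char)
  | [] => [s]
  | h :: t => (s ++ h) :: t

def pvMerge (xs ys : List (List Char)) : List (List Char) :=
  xs.dropLast ++ pvMergeHead (xs.getLastD []) ys

lemma pvMerge_ne_nil (xs ys : List (List Char)) : pvMerge xs ys ≠ [] := by
  unfold pvMerge
  cases ys with
  | nil => simp [pvMergeHead]
  | cons h t => simp [pvMergeHead]

lemma pvMerge_concat (x : List (List Char)) (a : List Char) (m : List (List Char)) :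
    pvMerge (x ++ [a]) m = x ++ pvMergeHead a m := by
  unfold pvMerge
  rw [List.dropLast_concat, List.getLastD_concat]

lemma pvDropLast_concat_getLastD (v : List (List Char)) (hv : v ≠ []) :
    v.dropLast ++ [v.getLastD []] = v := by
  induction v with
  | nil => exact absurd rfl hv
  | cons a t ih =>
    cases t with
    | nil => simp
    | cons b u => simpa using ih (by simp)

lemma pvMerge_nil_left (l : List (List Char)) (hl : l ≠ []) : pvMerge [[]] l = l := by
  cases l with
  | nil => exact absurd rfl hl
  | cons h t => simp [pvMerge, pvMergeHead]

lemma pvMerge_single_nil (v : List (List Char)) (hv : v ≠ []) : pvMerge v [[]] = v := by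
  unfold pvMerge pvMergeHead
  simpa using pvDropLast_concat_getLastD v hv

lemma pvMerge_cons_nil (v : List (List Char)) (hv : v ≠ []) (G : List (List Char)) :
    pvMerge v ([] :: G) = v ++ G := by
  unfold pvMerge
  have h1 : pvMergeHead (v.getLastD []) ([] :: G) = v.getLastD [] :: G := by simp [pvMergeHead]
  rw [h1, show v.getLastD [] :: G = [v.getLastD []] ++ G from rfl, ← List.append_assoc,
    pvDropLast_concat_getLastD v hv]

lemma pvMerge_append_nilseg (v : List (List Char)) (G : List (List Char)) (hG : G ≠ []) :
    pvMerge (v ++ [[]]) G = v ++ G := by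
  rw [pvMerge_concat]
  cases G with
  | nil => exact absurd rfl hG
  | cons h t => simp [pvMergeHead]

lemma pvMerge_snoc_char (v : List (List Char)) (c : Char) (G : List (List Char)) (hG : G ≠ []) :
    pvMerge (v.dropLast ++ [v.getLastD [] ++ [c]]) G = pvMerge v (G.modifyHead (fun s => c :: s)) := by
  cases G with
  | nil => exact absurd rfl hG
  | cons h t =>
    rw [pvMerge_concat]
    simp [pvMerge, pvMergeHead, List.modifyHead]

lemma pvMerge_append_left (x l m : List (List Char)) (hl : l ≠ []) :
    pvMerge (x ++ l) m = x ++ pvMerge l m := by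
  cases l with
  | nil => exact absurd rfl hl
  | cons a t =>
    unfold pvMerge
    rw [List.dropLast_append_cons]
    have hg : (x ++ a :: t).getLastD [] = (a :: t).getLastD [] := by
      rw [List.getLastD_eq_getLast?, List.getLastD_eq_getLast?,
        List.getLast?_append_of_ne_nil (l₁ := x) (by simp : (a :: t) ≠ [])]
    rw [hg, List.append_assoc]

lemma pvMerge_modifyHead_left (c : Char) (l X : List (List Char)) (hl : l ≠ []) (hX : X ≠ []) :
    pvMerge (l.modifyHead (fun s => c :: s)) X = (pvMerge l X).modifyHead (fun s => c :: s) := by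
  cases l with
  | nil => exact absurd rfl hl
  | cons h t =>
    cases t with
    | nil =>
      cases X with
      | nil => exact absurd rfl hX
      | cons a u => simp [pvMerge, pvMergeHead, List.modifyHead]
    | cons h2 u =>
      have h1 : pvMerge ((c :: h) :: h2 :: u) X = [c :: h] ++ pvMerge (h2 :: u) X := by
        rw [show ((c :: h) :: h2 :: u) = [c :: h] ++ (h2 :: u) from rfl]
        exact pvMerge_append_left _ _ _ (by simp)
      have h2' : pvMerge (h :: h2 :: u) X = [h] ++ pvMerge (h2 :: u) X := by
        rw [show (h :: h2 :: u) = [h] ++ (h2 :: u) from rfl]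
        exact pvMerge_append_left _ _ _ (by simp)
      simp [List.modifyHead, h1, h2']

lemma pvMerge_assoc (v l m : List (List Char)) (hl : l ≠ []) (hm : m ≠ []) :
    pvMerge (pvMerge v l) m = pvMerge v (pvMerge l m) := by
  cases l with
  | nil => exact absurd rfl hl
  | cons h t =>
    cases t with
    | nil =>
      cases m with
      | nil => exact absurd rfl hm
      | cons a u =>
        simp [pvMerge, pvMergeHead, List.append_assoc]
    | cons h2 u =>
      have e1 : pvMerge v (h :: h2 :: u) = (v.dropLast ++ [v.getLastD [] ++ h]) ++ (h2 :: u) := by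
        simp [pvMerge, pvMergeHead]
      have e2 : pvMerge (h :: h2 :: u) m = [h] ++ pvMerge (h2 :: u) m := by
        rw [show (h :: h2 :: u) = [h] ++ (h2 :: u) from rfl]
        exact pvMerge_append_left _ _ _ (by simp)
      rw [e1, pvMerge_append_left _ _ _ (by simp), e2]
      cases hp : pvMerge (h2 :: u) m with
      | nil => exact absurd hp (pvMerge_ne_nil _ _)
      | cons p ps =>
        simp [pvMerge, pvMergeHead, List.append_assoc]

-- A's value[index] += c touches the LAST segment (the invariant index = length-1)
lemma pvModify_last (v : List (List Char)) (hv : v ≠ []) (f : List Char → List Char) :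
    v.modify (v.length - 1) f = v.dropLast ++ [f (v.getLastD [])] := by
  induction v with
  | nil => exact absurd rfl hv
  | cons a t ih =>
    cases t with
    | nil => simp
    | cons b u =>
      have ht := ih (by simp)
      have h1 : (a :: b :: u).length - 1 = ((b :: u).length - 1) + 1 := by simp
      rw [h1, List.modify_succ_cons, ht]
      simp

-- A's loop computes pvMerge v (pvG q cs)
lemma pvFoldA (cs : List Char) : ∀ (q : Bool) (v : List (List Char)), v ≠ [] →
    (cs.foldl pvStepA (q, v, v.length - 1)).2.1 = pvMerge v (pvG q cs) := by
  induction cs with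
  | nil =>
    intro q v hv
    simp [List.foldl, pvG, pvMerge_single_nil v hv]
  | cons c cs ih =>
    intro q v hv
    simp only [List.foldl_cons, pvStepA, pvG]
    split_ifs with h1 h2
    · exact ih (!q) v hv
    · have hvl : 0 < v.length := List.length_pos_of_ne_nil hv
      have hlen : (v ++ [[]]).length - 1 = v.length - 1 + 1 := by
        simp only [List.length_append, List.length_cons, List.length_nil]
        omega
      rw [← hlen]
      rw [ih q (v ++ [[]]) (by simp)]
      have hq : q = false := by
        cases q
        · rfl
        · simp at h2
      subst hq
      rw [pvMerge_append_nilseg v _ (pvG_ne_nil _ _), pvMerge_cons_nil v hv _]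
    · rw [show (v.modify (v.length - 1) fun s => s ++ [c]) =
          v.dropLast ++ [v.getLastD [] ++ [c]] from pvModify_last v hv _]
      have hlen2 : (v.dropLast ++ [v.getLastD [] ++ [c]]).length - 1 = v.length - 1 := by
        cases v with
        | nil => exact absurd rfl hv
        | cons a t => simp
      rw [← hlen2, ih q _ (by simp)]
      exact pvMerge_snoc_char v c _ (pvG_ne_nil _ _)

-- B's parity-driven reference recursion over the '"'-split parts
lemma pvSplitOn_nil (a : Char) : List.splitOn a ([] : List Char) = [[]] := rfl

lemma pvSplitOn_cons (a c : Char) (cs : List Char) :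
    (c :: cs).splitOn a =
      if c == a then [] :: cs.splitOn a else (cs.splitOn a).modifyHead (List.cons c) := by
  simp [List.splitOn, List.splitOnP_cons]

lemma pvSplitOn_ne_nil (a : Char) (p : List Char) : p.splitOn a ≠ [] :=
  List.splitOnP_ne_nil _ _

def pvR : Bool → List (List Char) → List (List Char)
  | _, [] => [[]]
  | odd, p :: ps => pvMerge (if odd then [p] else p.splitOn '.') (pvR (!odd) ps)

lemma pvR_ne_nil (odd : Bool) (ps : List (List Char)) : pvR odd ps ≠ [] := by
  cases ps with
  | nil => simp [pvR]
  | cons p t => exact pvMerge_ne_nil _ _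

lemma pvEnumerate_cons {α : Type} (x : α) (xs : List α) (i : Int) :
    PySem.List.enumerate (x :: xs) i = (i, x) :: PySem.List.enumerate xs (i + 1) := rfl

lemma pvStepB_eq (res : List (List Char)) (hres : res ≠ []) (i : Int) (p : List Char) :
    pvStepB res (i, p) =
      pvMerge res (if PySem.Int.mod i 2 == 1 then [p] else p.splitOn '.') := by
  unfold pvStepB
  split_ifs with h
  · cases res with
    | nil => exact absurd rfl hres
    | cons a t => simp [pvAddLast, pvMerge, pvMergeHead]
  · have hsp : p.splitOn '.' ≠ [] := pvSplitOn_ne_nil _ _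
    cases hq : p.splitOn '.' with
    | nil => exact absurd hq hsp
    | cons h0 t0 =>
      simp [pvAddLast, pvMerge, pvMergeHead, List.append_assoc]

lemma pvParity_succ (i : Int) (hi : 0 ≤ i) :
    (PySem.Int.mod (i + 1) 2 == 1) = !(PySem.Int.mod i 2 == 1) := by
  rw [PySem.Int.mod_eq_emod_of_pos (by norm_num), PySem.Int.mod_eq_emod_of_pos (by norm_num)]
  rcases Int.emod_two_eq i with h | h
  · have : (i + 1) % 2 = 1 := by omega
    simp [h, this]
  · have : (i + 1) % 2 = 0 := by omega
    simp [h, this]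

-- B's loop computes pvMerge res (pvR parity parts)
lemma pvFoldB (parts : List (List Char)) : ∀ (i : Int), 0 ≤ i → ∀ (res : List (List Char)), res ≠ [] →
    (PySem.List.enumerate parts i).foldl pvStepB res =
      pvMerge res (pvR (PySem.Int.mod i 2 == 1) parts) := by
  induction parts with
  | nil =>
    intro i _ res hres
    simp [PySem.List.enumerate, pvR, pvMerge_single_nil res hres]
  | cons p ps ih =>
    intro i hi res hres
    rw [pvEnumerate_cons, List.foldl_cons, pvStepB_eq res hres i p,
      ih (i + 1) (by omega) _ (pvMerge_ne_nil _ _), pvParity_succ i hi]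
    rw [pvMerge_assoc res _ _ (by split_ifs <;> simp [pvSplitOn_ne_nil]) (pvR_ne_nil _ _)]
    rfl

-- the '"'-split of the char list, processed with alternating parity, is exactly pvG
lemma pvR_splitOn (cs : List Char) : ∀ (q : Bool), pvR q (cs.splitOn '"') = pvG q cs := by
  induction cs with
  | nil =>
    intro q
    rw [pvSplitOn_nil]
    cases q <;> rfl
  | cons c cs ih =>
    intro q
    rw [pvSplitOn_cons]
    by_cases hc : c = '"'
    · rw [if_pos (by simp [hc])]
      simp only [pvR]
      rw [show (if q = true then [([] : List Char)] else List.splitOn '.' ([] : List Char)) = [[]] from by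
        cases q <;> rfl]
      rw [pvMerge_nil_left _ (pvR_ne_nil _ _), ih (!q)]
      rw [show pvG q (c :: cs) = pvG (!q) cs from by simp [pvG, hc]]
    · rw [if_neg (by simp [hc])]
      cases hsp : cs.splitOn '"' with
      | nil => exact absurd hsp (pvSplitOn_ne_nil _ _)
      | cons p ps =>
        have ihq := ih q
        rw [hsp] at ihq
        have hg : pvG q (c :: cs) =
            if c == '.' && !q then [] :: pvG false cs else (pvG q cs).modifyHead (List.cons c) := by
          simp only [pvG]
          rw [if_neg (by simp [hc])]
        rw [hg]
        cases q with
        | true =>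
          rw [if_neg (by simp)]
          show pvMerge [c :: p] (pvR false ps) = _
          rw [show ([c :: p] : List (List Char)) = ([p] : List (List Char)).modifyHead (List.cons c) from rfl,
            pvMerge_modifyHead_left c [p] _ (by simp) (pvR_ne_nil _ _)]
          rw [show pvMerge [p] (pvR false ps) = pvG true cs from by simpa [pvR] using ihq]
        | false =>
          by_cases hd : c = '.'
          · rw [if_pos (by simp [hd]), hd]
            show pvMerge (List.splitOn '.' ('.' :: p)) (pvR true ps) = _
            rw [pvSplitOn_cons, if_pos (by simp)]
            rw [show ([] : List Char) :: List.splitOn '.' p = [[]] ++ List.splitOn '.' p from rfl,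
              pvMerge_append_left _ _ _ (pvSplitOn_ne_nil _ _)]
            rw [show pvMerge (List.splitOn '.' p) (pvR true ps) = pvG false cs from by
              simpa [pvR] using ihq]
            rfl
          · rw [if_neg (by simp [hd])]
            show pvMerge (List.splitOn '.' (c :: p)) (pvR true ps) = _
            rw [pvSplitOn_cons, if_neg (by simp [hd])]
            rw [pvMerge_modifyHead_left c _ _ (pvSplitOn_ne_nil _ _) (pvR_ne_nil _ _)]
            rw [show pvMerge (List.splitOn '.' p) (pvR true ps) = pvG false cs from by
              simpa [pvR] using ihq]

-- ===== VERDICT (by name: the statement is the Claim_ definition above) =====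
theorem split_dot_spec : Claim_equal_split_dot := by
  unfold Claim_equal_split_dot Spec_split_dot
  intro key _
  unfold split_dot split_dot_alt
  have hA : (key.toList.foldl pvStepA (false, [[]], 0)).2.1 = pvG false key.toList := by
    have := pvFoldA key.toList false [[]] (by simp)
    simpa [pvMerge_nil_left _ (pvG_ne_nil _ _)] using this
  have hB : (PySem.List.enumerate (key.toList.splitOn '"')).foldl pvStepB [[]] =
      pvG false key.toList := by
    rw [pvFoldB (key.toList.splitOn '"') 0 (by norm_num) [[]] (by simp)]
    rw [pvMerge_nil_left _ (pvR_ne_nil _ _)]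
    exact pvR_splitOn key.toList false
  simp only [hA, hB]
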